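-- pv_equiv track=rewrite | github.com/franzos/stackpit | scripts/sourcemap-test/main.py | vlq_encode
-- ===== SOURCE A (Python) =====
-- B64 = "ABCDEFGHIJKLMNOPQRSTUVWXYZabcdefghijklmnopqrstuvwxyz0123456789+/"
--
-- def vlq_encode(value):
--     """Encode a single integer as a base64-VLQ string."""
--     vlq = ((-value) << 1 | 1) if value < 0 else (value << 1)
--     result = []
--     while True:
--         digit = vlq & 0x1F
--         vlq >>= 5
--         if vlq > 0:
--             digit |= 0x20
--         result.append(B64[digit])
--         if vlq == 0:
--             break
--     return "".join(result)
-- ===== SOURCE B (Python) =====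
-- B64 = "ABCDEFGHIJKLMNOPQRSTUVWXYZabcdefghijklmnopqrstuvwxyz0123456789+/"
--
-- def vlq_encode(value):
--     """Encode a single integer as a base64-VLQ string."""
--     vlq = ((-value) << 1 | 1) if value < 0 else (value << 1)
--     # closed form: the number of 5-bit groups follows from the bit length,
--     # and group i is extracted independently by a shift; no sequential peeling.
--     n = max(1, (vlq.bit_length() + 4) // 5)
--     return "".join(
--         B64[((vlq >> (5 * i)) & 0x1F) | (0x20 if i < n - 1 else 0)]
--         for i in range(n)
--     )
-- ===== Notes on version B (the rewrite author's own statement) =====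
-- stated objective: alternative
-- what changed: A's state-mutating loop (repeatedly shifting vlq, with an in-loop lookahead deciding the continuation bit) is replaced by a closed-form scheme: the number of 5-bit groups is computed once from the bit length, and each group is extracted independently by an indexed shift, the continuation bit decided by position index alone.
import Mathlib
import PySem

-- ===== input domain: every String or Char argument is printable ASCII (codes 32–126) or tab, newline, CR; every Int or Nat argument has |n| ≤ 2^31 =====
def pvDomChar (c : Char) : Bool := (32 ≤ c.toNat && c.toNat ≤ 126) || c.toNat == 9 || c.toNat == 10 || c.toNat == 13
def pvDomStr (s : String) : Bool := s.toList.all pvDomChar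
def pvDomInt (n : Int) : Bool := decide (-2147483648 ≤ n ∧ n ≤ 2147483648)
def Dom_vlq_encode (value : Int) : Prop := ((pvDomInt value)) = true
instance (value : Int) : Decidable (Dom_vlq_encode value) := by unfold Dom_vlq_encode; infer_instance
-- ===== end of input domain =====

-- B replaces A's sequential state-mutating loop (with lookahead for the continuation
-- bit) by a closed form: group count from the bit length, each 5-bit group extracted
-- independently by an indexed shift (alternative, same cost).

-- ===== PORT A =====
def pvB64 : List Char := "ABCDEFGHIJKLMNOPQRSTUVWXYZabcdefghijklmnopqrstuvwxyz0123456789+/".toList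

-- B64[digit]; digit is always < 64 here, so the default is never used (Python never raises)
def pvB64get (i : Nat) : Char := pvB64.getD i 'A'

-- the while-True loop of A; vlq is always ≥ 0 in A, so we loop over the exact Nat value
def vlqLoopA (vlq : Nat) (result : List Char) : List Char :=
  let digit := vlq &&& 0x1F
  let vlq' := vlq >>> 5
  let digit' := if vlq' > 0 then digit ||| 0x20 else digit
  let result' := result ++ [pvB64get digit']
  if _h : vlq' = 0 then result' else vlqLoopA vlq' result'
termination_by vlq
decreasing_by
  have _h32 : vlq' = vlq / 32 := by simp [vlq', Nat.shiftRight_eq_div_pow]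
  omega

def vlq_encode (value : Int) : String :=
  -- the selected branch's operand is ≥ 0, so computing the zigzag in Nat via toNat is exact
  let vlq : Nat := if value < 0 then ((-value).toNat <<< 1) ||| 1 else value.toNat <<< 1
  String.ofList (vlqLoopA vlq [])

-- ===== PORT B =====
def vlq_encode_alt (value : Int) : String :=
  -- same zigzag step as A; the selected branch's operand is ≥ 0, so Nat via toNat is exact
  let vlq : Nat := if value < 0 then ((-value).toNat <<< 1) ||| 1 else value.toNat <<< 1
  -- int.bit_length() is Nat.size
  let n := max 1 ((Nat.size vlq + 4) / 5)
  String.ofList ((List.range n).map (fun i =>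
    pvB64get (((vlq >>> (5 * i)) &&& 0x1F) ||| (if i < n - 1 then 0x20 else 0))))

-- ===== PRECONDITION & SPEC =====
def Spec_vlq_encode (value : Int) (out : String) : Prop := out = vlq_encode_alt value
instance (value : Int) (out : String) : Decidable (Spec_vlq_encode value out) := by unfold Spec_vlq_encode; infer_instance

-- ===== CLAIM (what is proved, stated in full; the proofs are below) =====
def Claim_equal_vlq_encode : Prop := ∀ (value : Int), Dom_vlq_encode value → Spec_vlq_encode value (vlq_encode value)

-- ===== LEMMAS AND PROOFS =====

-- B's digit list, as a function of the (nonnegative) zigzag value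
def bDigits (n : Nat) : List Char :=
  (List.range (max 1 ((Nat.size n + 4) / 5))).map (fun i =>
    pvB64get (((n >>> (5 * i)) &&& 0x1F) ||| (if i < max 1 ((Nat.size n + 4) / 5) - 1 then 0x20 else 0)))

lemma size_div32 (n : Nat) (h : n / 32 ≠ 0) : Nat.size (n / 32) = Nat.size n - 5 := by
  have key : ∀ k, Nat.size (n / 32) ≤ k ↔ Nat.size n ≤ k + 5 := by
    intro k
    rw [Nat.size_le, Nat.size_le, pow_add]
    rw [Nat.div_lt_iff_lt_mul (by norm_num : (0:ℕ) < 32)]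
    norm_num
  have h6 : ¬ Nat.size n ≤ 5 := by
    rw [Nat.size_le]
    omega
  have h1 := (key (Nat.size (n / 32))).mp le_rfl
  have h2 := (key (Nat.size n - 5)).mpr (by omega)
  omega

lemma vlqLoopA_acc (n : Nat) (acc : List Char) :
    vlqLoopA n acc = acc ++ vlqLoopA n [] := by
  induction n using Nat.strong_induction_on generalizing acc with
  | _ n ih =>
    have hdiv : n >>> 5 = n / 32 := by simp [Nat.shiftRight_eq_div_pow]
    conv_lhs => rw [vlqLoopA]
    conv_rhs => rw [vlqLoopA]
    by_cases h : n >>> 5 = 0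
    · simp [h]
    · have hlt : n >>> 5 < n := by omega
      simp only [h, dite_false]
      rw [ih _ hlt, ih _ hlt (acc := [] ++ _)]
      simp

lemma bDigits_step (n : Nat) (h : n / 32 ≠ 0) :
    bDigits n = pvB64get ((n &&& 0x1F) ||| 0x20) :: bDigits (n / 32) := by
  have hsz32 : Nat.size (n / 32) = Nat.size n - 5 := size_div32 n h
  have hszpos : 0 < Nat.size (n / 32) := Nat.size_pos.mpr (Nat.pos_of_ne_zero h)
  have hsz6 : ¬ Nat.size n ≤ 5 := by rw [Nat.size_le]; omega
  have hstep : max 1 ((Nat.size n + 4) / 5) = max 1 ((Nat.size (n / 32) + 4) / 5) + 1 := by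
    omega
  rw [bDigits, bDigits, hstep, List.range_succ_eq_map]
  simp only [List.map_cons, List.map_map]
  congr 1
  · simp
  · apply List.map_congr_left
    intro i hi
    have hsh : n >>> (5 * (i + 1)) = (n / 32) >>> (5 * i) := by
      have h5 : 5 * (i + 1) = 5 + 5 * i := by ring
      have hdiv : n >>> 5 = n / 32 := by simp [Nat.shiftRight_eq_div_pow]
      rw [h5, Nat.shiftRight_add, hdiv]
    have hcond : (i + 1 < max 1 ((Nat.size (n / 32) + 4) / 5) + 1 - 1)
        = (i < max 1 ((Nat.size (n / 32) + 4) / 5) - 1) := by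
      simp only [eq_iff_iff]; omega
    simp only [Function.comp_apply, hsh, hcond]

lemma vlq_main (n : Nat) : vlqLoopA n [] = bDigits n := by
  induction n using Nat.strong_induction_on with
  | _ n ih =>
    have hdiv : n >>> 5 = n / 32 := by simp [Nat.shiftRight_eq_div_pow]
    rw [vlqLoopA]
    by_cases h : n / 32 = 0
    · -- one group: n < 32, so the count is 1 and the single digit carries no continuation bit
      have hsz : Nat.size n ≤ 5 := by rw [Nat.size_le]; omega
      have hn1 : max 1 ((Nat.size n + 4) / 5) = 1 := by omega
      simp [hdiv, h, bDigits, hn1]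
    · -- recursive group: head digit gets the continuation bit, tail is the encoding of n / 32
      have hlt : n / 32 < n := by omega
      have hpos : 0 < n / 32 := Nat.pos_of_ne_zero h
      simp only [hdiv, h, dite_false, hpos, if_pos]
      rw [vlqLoopA_acc, ih _ hlt, bDigits_step n h]
      simp

-- ===== VERDICT (by name: the statement is the Claim_ definition above) =====
theorem vlq_encode_spec : Claim_equal_vlq_encode := by
  intro value _
  unfold Spec_vlq_encode vlq_encode vlq_encode_alt
  dsimp only
  rw [vlq_main, bDigits]
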